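-- pv_equiv track=rewrite | github.com/haslamdb/aegis | aegis-django/apps/surgical_prophylaxis/fhir_client.py | has_beta_lactam_allergy
-- ===== SOURCE A (Python) =====
-- def has_beta_lactam_allergy(allergies: list[str]) -> bool:
--     beta_lactam_keywords = [
--         "penicillin", "amoxicillin", "ampicillin", "cephalosporin",
--         "cefazolin", "ceftriaxone", "cefepime", "piperacillin",
--         "beta-lactam", "carbapenem", "meropenem",
--     ]
--     for allergy in allergies:
--         allergy_lower = allergy.lower()
--         if any(kw in allergy_lower for kw in beta_lactam_keywords):
--             return True
--     return False
-- ===== SOURCE B (Python) =====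
-- def has_beta_lactam_allergy(allergies: list[str]) -> bool:
--     beta_lactam_keywords = [
--         "penicillin", "amoxicillin", "ampicillin", "cephalosporin",
--         "cefazolin", "ceftriaxone", "cefepime", "piperacillin",
--         "beta-lactam", "carbapenem", "meropenem",
--     ]
--     # Combine all allergies into one newline-joined lowercase text; since no
--     # keyword contains a newline, a keyword occurs in the combined text iff it
--     # occurs in some individual allergy.
--     text = "\n".join(allergy.lower() for allergy in allergies)
--     return any(kw in text for kw in beta_lactam_keywords)
-- ===== Notes on version B (the rewrite author's own statement) =====
-- stated objective: faster
-- what changed: B concatenates all lowercased allergies into one newline-joined text and tests each keyword once against that combined text (11 substring scans total done in C), instead of A's per-allergy Python loop with an inner keyword scan; correct because no keyword contains a newline, so a match cannot cross a join boundary.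
import Mathlib
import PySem

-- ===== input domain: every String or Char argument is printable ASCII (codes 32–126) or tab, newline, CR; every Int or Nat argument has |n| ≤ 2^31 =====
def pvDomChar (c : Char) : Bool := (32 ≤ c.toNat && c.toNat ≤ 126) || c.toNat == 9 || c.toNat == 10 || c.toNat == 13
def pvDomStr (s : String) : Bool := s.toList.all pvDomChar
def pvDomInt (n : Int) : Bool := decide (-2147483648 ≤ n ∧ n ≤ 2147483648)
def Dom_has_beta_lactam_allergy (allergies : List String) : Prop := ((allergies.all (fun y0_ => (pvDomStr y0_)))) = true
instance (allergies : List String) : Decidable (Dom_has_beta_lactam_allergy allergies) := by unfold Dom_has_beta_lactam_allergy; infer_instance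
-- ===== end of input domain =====

-- B joins all lowered allergies into one newline-separated text and tests each keyword once
-- against it (no keyword contains a newline, so no match crosses a boundary); alternative structure.

def pvKeywords : List String :=
  ["penicillin", "amoxicillin", "ampicillin", "cephalosporin",
   "cefazolin", "ceftriaxone", "cefepime", "piperacillin",
   "beta-lactam", "carbapenem", "meropenem"]

-- ===== PORT A =====
-- allergy-major loop with early return; 'kw in allergy_lower' = PySem.Str.isIn
def has_beta_lactam_allergy (allergies : List String) : Bool :=
  match allergies with
  | [] => false
  | allergy :: rest =>
    let allergy_lower := PySem.Str.lower allergy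
    if pvKeywords.any (fun kw => PySem.Str.isIn kw allergy_lower) then true
    else has_beta_lactam_allergy rest

-- ===== PORT B =====
-- one combined newline-joined lowercase text; each keyword tested once against it
def has_beta_lactam_allergy_alt (allergies : List String) : Bool :=
  let text := PySem.Str.join "\n" (allergies.map (fun allergy => PySem.Str.lower allergy))
  pvKeywords.any (fun kw => PySem.Str.isIn kw text)

-- ===== PRECONDITION & SPEC =====
def Spec_has_beta_lactam_allergy (allergies : List String) (out : Bool) : Prop := out = has_beta_lactam_allergy_alt allergies
instance (allergies : List String) (out : Bool) : Decidable (Spec_has_beta_lactam_allergy allergies out) := by unfold Spec_has_beta_lactam_allergy; infer_instance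

-- ===== CLAIM (what is proved, stated in full; the proofs are below) =====
def Claim_equal_has_beta_lactam_allergy : Prop := ∀ (allergies : List String), Dom_has_beta_lactam_allergy allergies → Spec_has_beta_lactam_allergy allergies (has_beta_lactam_allergy allergies)

-- ===== LEMMAS AND PROOFS =====

-- A's early-return loop is the allergy-major 'any'
theorem portA_eq_any (allergies : List String) :
    has_beta_lactam_allergy allergies =
      allergies.any (fun a => pvKeywords.any (fun kw => PySem.Str.isIn kw (PySem.Str.lower a))) := by
  induction allergies with
  | nil => rfl
  | cons a rest ih =>
    simp only [has_beta_lactam_allergy, List.any_cons]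
    split_ifs with h
    · rw [h, Bool.true_or]
    · simp only [Bool.not_eq_true] at h
      rw [h, Bool.false_or, ih]

-- a keyword not containing the separator char cannot straddle it
theorem prefix_of_prefix_append_cons {kw u v : List Char} {c : Char}
    (hc : c ∉ kw) (h : kw <+: u ++ c :: v) : kw <+: u := by
  induction kw generalizing u with
  | nil => exact List.nil_prefix
  | cons k kw' ih =>
    cases u with
    | nil =>
      rcases List.cons_prefix_cons.mp h with ⟨rfl, -⟩
      exact absurd List.mem_cons_self hc
    | cons y u' =>
      rw [List.cons_append] at h
      rcases List.cons_prefix_cons.mp h with ⟨rfl, h'⟩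
      exact List.cons_prefix_cons.mpr
        ⟨rfl, ih (fun hm => hc (List.mem_cons_of_mem _ hm)) h'⟩

theorem infix_append_cons_iff (kw a b : List Char) (c : Char) (hc : c ∉ kw) :
    kw <:+: (a ++ c :: b) ↔ kw <:+: a ∨ kw <:+: b := by
  constructor
  · intro h
    induction a with
    | nil =>
      simp only [List.nil_append] at h
      rcases List.infix_cons_iff.mp h with h' | h'
      · cases kw with
        | nil => exact Or.inl List.nil_infix
        | cons k kw' =>
          rcases List.cons_prefix_cons.mp h' with ⟨rfl, -⟩
          exact absurd List.mem_cons_self hc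
      · exact Or.inr h'
    | cons x a' ih =>
      rw [List.cons_append] at h
      rcases List.infix_cons_iff.mp h with h' | h'
      · refine Or.inl (List.IsPrefix.isInfix ?_)
        exact prefix_of_prefix_append_cons hc (by simpa using h')
      · rcases ih h' with h'' | h''
        · exact Or.inl (List.infix_cons h'')
        · exact Or.inr h''
  · rintro (h | h)
    · exact h.trans ⟨[], c :: b, by simp⟩
    · exact h.trans ⟨a ++ [c], [], by simp⟩

theorem infix_join_iff (kw : List Char) (hne : kw ≠ []) (hc : '\n' ∉ kw)
    (pieces : List (List Char)) :
    kw <:+: PySem.Chars.join ['\n'] pieces ↔ ∃ p ∈ pieces, kw <:+: p := by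
  induction pieces with
  | nil => simp [PySem.Chars.join_nil, List.infix_nil, hne]
  | cons p rest ih =>
    cases rest with
    | nil => simp [PySem.Chars.join_singleton]
    | cons q rest' =>
      rw [PySem.Chars.join_cons_cons]
      have : p ++ ['\n'] ++ PySem.Chars.join ['\n'] (q :: rest')
           = p ++ '\n' :: PySem.Chars.join ['\n'] (q :: rest') := by simp
      rw [this, infix_append_cons_iff kw _ _ _ hc, ih]
      simp

-- ===== VERDICT (by name: the statement is the Claim_ definition above) =====
theorem has_beta_lactam_allergy_spec : Claim_equal_has_beta_lactam_allergy := by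
  intro allergies _
  unfold Spec_has_beta_lactam_allergy has_beta_lactam_allergy_alt
  rw [portA_eq_any]
  simp only [PySem.Str.isIn_eq]
  apply Bool.eq_iff_iff.mpr
  simp only [List.any_eq_true, PySem.Chars.isIn_iff_infix, PySem.Str.toList_join, List.map_map]
  have hkw : ∀ kw ∈ pvKeywords, kw.toList ≠ [] ∧ '\n' ∉ kw.toList := by decide
  constructor
  · rintro ⟨a, ha, kw, hkw', hin⟩
    exact ⟨kw, hkw', (infix_join_iff _ (hkw kw hkw').1 (hkw kw hkw').2 _).mpr
      ⟨(PySem.Str.lower a).toList, by simpa using ⟨a, ha, rfl⟩, hin⟩⟩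
  · rintro ⟨kw, hkw', hin⟩
    rcases (infix_join_iff _ (hkw kw hkw').1 (hkw kw hkw').2 _).mp hin with ⟨p, hp, hinp⟩
    simp only [List.mem_map, Function.comp] at hp
    rcases hp with ⟨a, ha, rfl⟩
    exact ⟨a, ha, kw, hkw', hinp⟩
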